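-- pv_equiv track=rewrite | github.com/williamdarkocode/AlgortithmsAndDataStructures | Python_Algos_Datastructstures/netflixcodesignal.py | bhandle
-- ===== SOURCE A (Python) =====
-- def bhandle(a:list,b:list,qx:list):
--     aset = {}
--     for n in a:
--         if n not in aset:
--             aset[n] = 0
--         aset[n]+=1
--
--     bset = {}
--     for n in b:
--         if n not in bset:
--             bset[n] = 0
--         bset[n]+=1
--
--
--     pairs = set()
--     count = 0
--
--     if len(b) > len(a):
--         for i, n in enumerate(b):
--             if (qx-n) in aset:
--                 count+=aset[(qx-n)]
--         return count
--     else: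
--         for i, n in enumerate(a):
--             if (qx-n) in bset:
--                 count+=bset[(qx-n)]
--         return count
-- ===== SOURCE B (Python) =====
-- def bhandle(a: list, b: list, qx: list):
--     ca = {}
--     for n in a:
--         ca[n] = ca.get(n, 0) + 1
--     cb = {}
--     for n in b:
--         cb[n] = cb.get(n, 0) + 1
--     return sum(c * cb.get(qx - x, 0) for x, c in ca.items())
-- ===== Notes on version B (the rewrite author's own statement) =====
-- stated objective: simpler
-- what changed: Instead of choosing the longer list and scanning its elements one by one against the other list's frequency dict, B builds both frequency dicts and computes the answer in a single pass over the DISTINCT keys of a's counter, multiplying the two frequencies (count_a[x] * count_b[qx-x]); no branch on list lengths and no per-element scan.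
import Mathlib
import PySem

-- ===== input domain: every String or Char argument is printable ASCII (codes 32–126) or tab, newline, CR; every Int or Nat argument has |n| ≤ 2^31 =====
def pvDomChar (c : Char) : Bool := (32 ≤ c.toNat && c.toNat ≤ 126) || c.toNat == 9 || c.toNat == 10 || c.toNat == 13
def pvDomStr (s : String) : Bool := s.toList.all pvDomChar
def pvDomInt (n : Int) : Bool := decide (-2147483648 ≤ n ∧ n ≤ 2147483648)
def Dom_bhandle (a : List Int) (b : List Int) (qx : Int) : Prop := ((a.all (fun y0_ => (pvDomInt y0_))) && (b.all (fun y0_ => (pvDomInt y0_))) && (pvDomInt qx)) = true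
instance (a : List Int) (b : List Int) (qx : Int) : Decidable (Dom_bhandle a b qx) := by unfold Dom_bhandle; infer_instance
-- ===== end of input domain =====

-- B replaces A's length-branch and per-element scan by one pass over the distinct keys of a's
-- frequency dict, multiplying the two frequencies; objective: simpler.


-- ===== PORT A =====
-- counter loop of A: `if n not in d: d[n] = 0`, then `d[n] += 1`
def bhandleStep (d : PySem.Dict Int Int) (n : Int) : PySem.Dict Int Int :=
  let d := if d.contains n then d else d.insert n 0
  d.insert n (d.getD n 0 + 1)

def bhandle (a : List Int) (b : List Int) (qx : Int) : Int :=
  let aset := a.foldl bhandleStep PySem.Dict.empty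
  let bset := b.foldl bhandleStep PySem.Dict.empty
  -- `pairs = set()` in A is never used; `count = 0` is the fold's initial accumulator
  if b.length > a.length then
    (PySem.List.enumerate b 0).foldl
      (fun count p => if aset.contains (qx - p.2) then count + aset.getD (qx - p.2) 0 else count) 0
  else
    (PySem.List.enumerate a 0).foldl
      (fun count p => if bset.contains (qx - p.2) then count + bset.getD (qx - p.2) 0 else count) 0

-- ===== PORT B =====
def bhandle_alt (a : List Int) (b : List Int) (qx : Int) : Int :=
  let ca := a.foldl (fun d n => d.insert n (d.getD n 0 + 1)) PySem.Dict.empty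
  let cb := b.foldl (fun d n => d.insert n (d.getD n 0 + 1)) PySem.Dict.empty
  (ca.items.map (fun p => p.2 * cb.getD (qx - p.1) 0)).sum

-- ===== PRECONDITION & SPEC =====
def Spec_bhandle (a : List Int) (b : List Int) (qx : Int) (out : Int) : Prop := out = bhandle_alt a b qx
instance (a : List Int) (b : List Int) (qx : Int) (out : Int) : Decidable (Spec_bhandle a b qx out) := by unfold Spec_bhandle; infer_instance

-- ===== CLAIM (what is proved, stated in full; the proofs are below) =====
def Claim_equal_bhandle : Prop := ∀ (a : List Int) (b : List Int) (qx : Int), Dom_bhandle a b qx → Spec_bhandle a b qx (bhandle a b qx)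

-- ===== LEMMAS AND PROOFS =====

-- A's counter build counts occurrences
lemma getD_foldl_bhandleStep (l : List Int) (d : PySem.Dict Int Int) (v : Int) :
    (l.foldl bhandleStep d).getD v 0 = d.getD v 0 + l.count v := by
  induction l generalizing d with
  | nil => simp
  | cons n t ih =>
      rw [List.foldl_cons, ih, List.count_cons]
      have hstep : (bhandleStep d n).getD v 0 = d.getD v 0 + if n == v then 1 else 0 := by
        unfold bhandleStep
        by_cases hc : d.contains n
        · rw [if_pos hc, PySem.Dict.getD_insert]
          by_cases hv : v = n
          · simp [hv]
          · simp [hv, Ne.symm hv]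
        · rw [if_neg hc, PySem.Dict.getD_insert, PySem.Dict.getD_insert]
          by_cases hv : v = n
          · subst hv
            rw [PySem.Dict.getD_of_not_contains _ _ (by simpa using hc)]
            simp
          · simp [PySem.Dict.getD_insert, hv]
            omega
      rw [hstep]
      push_cast
      ring

-- the membership guard in A's scan is redundant: a missing key contributes getD = 0
lemma ite_contains_add (d : PySem.Dict Int Int) (k c : Int) :
    (if d.contains k then c + d.getD k 0 else c) = c + d.getD k 0 := by
  by_cases h : d.contains k
  · simp [h]
  · rw [if_neg h, PySem.Dict.getD_of_not_contains _ _ (by simpa using h)]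
    ring

-- mapping a function of the element over an enumerate drops the indices
lemma map_snd_comp_enumerate {α : Type} (l : List Int) (s : Int) (f : Int → α) :
    (PySem.List.enumerate l s).map (fun p => f p.2) = l.map f := by
  induction l generalizing s with
  | nil => rfl
  | cons x t ih => rw [PySem.List.enumerate_cons, List.map_cons, List.map_cons, ih]

-- A's scan over a list l against the counter of a list s sums s.count (qx - n) over n ∈ l
lemma scan_eq_sum (l s : List Int) (qx : Int) :
    (PySem.List.enumerate l 0).foldl
      (fun count p => if (s.foldl bhandleStep PySem.Dict.empty).contains (qx - p.2) then
          count + (s.foldl bhandleStep PySem.Dict.empty).getD (qx - p.2) 0 else count) 0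
      = (l.map (fun n => ((s.count (qx - n) : Nat) : Int))).sum := by
  simp only [ite_contains_add]
  rw [PySem.List.foldl_add]
  rw [map_snd_comp_enumerate l 0 (fun n => (s.foldl bhandleStep PySem.Dict.empty).getD (qx - n) 0), zero_add]
  simp only [getD_foldl_bhandleStep, PySem.Dict.getD_empty, zero_add]

-- a 0/1 indicator sum is a count
lemma sum_indicator_eq_count (a : List Int) (qx n : Int) :
    (a.map (fun m => if n = qx - m then (1:Int) else 0)).sum = ((a.count (qx - n) : Nat) : Int) := by
  induction a with
  | nil => simp
  | cons x t ih =>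
      simp only [List.map_cons, List.sum_cons, List.count_cons, beq_iff_eq]
      push_cast
      rw [ih]
      split_ifs with h1 h2 h2 <;> omega

-- double counting: scanning b against a's counts = scanning a against b's counts
lemma swap_sum (a b : List Int) (qx : Int) :
    (b.map (fun n => ((a.count (qx - n) : Nat) : Int))).sum
      = (a.map (fun m => ((b.count (qx - m) : Nat) : Int))).sum := by
  induction b with
  | nil => simp
  | cons n b' ih =>
      simp only [List.map_cons, List.sum_cons, List.count_cons, beq_iff_eq]
      rw [ih]
      push_cast
      rw [PySem.List.sum_map_add_int, sum_indicator_eq_count]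
      ring

-- summing any F over the distinct elements of l is a Finset sum
lemma sum_dedup_map (l : List Int) (F : Int → Int) :
    ((PySem.List.dedup l).map F).sum = ∑ m ∈ l.toFinset, F m := by
  rw [Finset.sum_list_map_count]
  apply Finset.sum_congr
  · ext m; simp [List.mem_toFinset]
  · intro m hm
    rw [List.count_eq_one_of_mem (PySem.List.nodup_dedup l)]
    · simp
    · rw [PySem.List.mem_dedup]; simpa using hm

-- grouping a sum over l by distinct values
lemma sum_map_eq_finset_count (l : List Int) (g : Int → Int) :
    (l.map g).sum = ∑ m ∈ l.toFinset, (l.count m : Int) * g m := by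
  rw [Finset.sum_list_map_count]
  apply Finset.sum_congr rfl
  intro m hm
  simp

-- B's value = scanning a against b's counts
lemma alt_eq_scan (a b : List Int) (qx : Int) :
    bhandle_alt a b qx = (a.map (fun m => ((b.count (qx - m) : Nat) : Int))).sum := by
  rw [show bhandle_alt a b qx
      = ((PySem.Dict.counter a).items.map
          (fun p => p.2 * (PySem.Dict.counter b).getD (qx - p.1) 0)).sum from rfl]
  rw [PySem.Dict.items_counter]
  simp only [List.map_map, Function.comp_def, PySem.Dict.getD_counter]
  rw [← PySem.List.dedup_eq_ofList]
  rw [sum_dedup_map a (fun k => (a.count k : Int) * (b.count (qx - k) : Int)),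
      sum_map_eq_finset_count a (fun m => ((b.count (qx - m) : Nat) : Int))]

-- ===== VERDICT (by name: the statement is the Claim_ definition above) =====
theorem bhandle_spec : Claim_equal_bhandle := by
  intro a b qx _
  unfold Spec_bhandle
  rw [alt_eq_scan]
  rw [show bhandle a b qx
      = if b.length > a.length then
          (PySem.List.enumerate b 0).foldl
            (fun count p => if (a.foldl bhandleStep PySem.Dict.empty).contains (qx - p.2) then
                count + (a.foldl bhandleStep PySem.Dict.empty).getD (qx - p.2) 0 else count) 0
        else
          (PySem.List.enumerate a 0).foldl
            (fun count p => if (b.foldl bhandleStep PySem.Dict.empty).contains (qx - p.2) then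
                count + (b.foldl bhandleStep PySem.Dict.empty).getD (qx - p.2) 0 else count) 0
      from rfl]
  by_cases h : b.length > a.length
  · rw [if_pos h, scan_eq_sum b a qx, swap_sum]
  · rw [if_neg h, scan_eq_sum a b qx]
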